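-- pv_equiv track=rewrite | github.com/mkryvets/alg-data-struct | array-matrix-algorithms/array_algorithms.py | sort_max_min
-- ===== SOURCE A (Python) =====
-- def min_element(arr):
--     min_el = arr[0]
--     min_el_index = 0
--     for i in range(len(arr)):
--         if arr[i] < min_el:
--             min_el = arr[i]
--             min_el_index = i
--     return min_el, min_el_index
--
-- def max_element(arr):
--     max_el = arr[0]
--     max_el_index = 0
--     for i in range(len(arr)):
--         if arr[i] > max_el:
--             max_el = arr[i]
--             max_el_index = i
--     return max_el, max_el_index
--
-- def sort_max_min(arr):
--     i = 0
--     result_arr = []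
--     temp_arr = []
--     for el in arr:
--         temp_arr.append(el)
--     while i < len(arr):
--         max_el = max_element(temp_arr)
--         result_arr.append(max_el[0])
--         del temp_arr[max_el[1]]
--         i += 1
--         if i < len(arr):
--             min_el = min_element(temp_arr)
--             result_arr.append(min_el[0])
--             del temp_arr[min_el[1]]
--             i += 1
--     return result_arr
-- ===== SOURCE B (Python) =====
-- def sort_max_min(arr):
--     s = sorted(arr)
--     res = []
--     lo, hi = 0, len(s) - 1
--     while lo <= hi:
--         res.append(s[hi])
--         if lo < hi:
--             res.append(s[lo])
--         lo += 1
--         hi -= 1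
--     return res
-- ===== Notes on version B (the rewrite author's own statement) =====
-- stated objective: faster
-- what changed: A repeatedly scans the remaining list for its max then its min and deletes them (quadratic selection); B sorts once and interleaves the sorted list from its two ends recursively.
import Mathlib
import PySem

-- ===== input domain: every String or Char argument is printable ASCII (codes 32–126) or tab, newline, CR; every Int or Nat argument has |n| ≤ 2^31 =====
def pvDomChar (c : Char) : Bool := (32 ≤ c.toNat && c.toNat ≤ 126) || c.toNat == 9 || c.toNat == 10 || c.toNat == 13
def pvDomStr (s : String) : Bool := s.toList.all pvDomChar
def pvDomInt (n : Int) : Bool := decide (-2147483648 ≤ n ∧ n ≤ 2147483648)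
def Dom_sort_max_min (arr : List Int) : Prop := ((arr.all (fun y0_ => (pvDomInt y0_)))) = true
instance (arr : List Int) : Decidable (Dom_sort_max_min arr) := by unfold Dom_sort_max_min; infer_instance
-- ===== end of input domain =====

-- B replaces A's quadratic repeated max/min extraction by one sort followed by an
-- interleave taking alternately from the two ends of the sorted list (objective: faster).

-- ===== PORT A =====
-- helper: Python's max_element(arr); Python raises IndexError on [] (arr[0]), but
-- sort_max_min only calls it on nonempty lists, where headD's default is never used.
def max_element (arr : List Int) : Int × Nat :=
  (List.range arr.length).foldl
    (fun st i => if arr.getD i 0 > st.1 then (arr.getD i 0, i) else st)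
    (arr.headD 0, 0)

def min_element (arr : List Int) : Int × Nat :=
  (List.range arr.length).foldl
    (fun st i => if arr.getD i 0 < st.1 then (arr.getD i 0, i) else st)
    (arr.headD 0, 0)

-- A's while loop: i counts extracted elements, temp shrinks via eraseIdx (Python's del)
def sortLoopA (n : Nat) (i : Nat) (temp : List Int) : List Int :=
  if i < n then
    let mx := max_element temp
    let temp1 := temp.eraseIdx mx.2
    if i + 1 < n then
      let mn := min_element temp1
      mx.1 :: mn.1 :: sortLoopA n (i + 2) (temp1.eraseIdx mn.2)
    else
      mx.1 :: sortLoopA n (i + 1) temp1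
  else []
termination_by n - i

def sort_max_min (arr : List Int) : List Int :=
  sortLoopA arr.length 0 arr

-- ===== PORT B =====
-- Source B's while loop: res takes s[hi], then s[lo] if lo < hi, moving both pointers inward
def weaveLoop (s : List Int) (lo hi : Int) : List Int :=
  if lo ≤ hi then
    PySem.List.pyGetD s hi 0 ::
      ((if lo < hi then [PySem.List.pyGetD s lo 0] else []) ++ weaveLoop s (lo + 1) (hi - 1))
  else []
termination_by (hi + 1 - lo).toNat
decreasing_by omega

def sort_max_min_alt (arr : List Int) : List Int :=
  let s := PySem.List.sorted arr (fun x => x) false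
  weaveLoop s 0 ((s.length : Int) - 1)

-- ===== PRECONDITION & SPEC =====
def Spec_sort_max_min (arr : List Int) (out : List Int) : Prop := out = sort_max_min_alt arr
instance (arr : List Int) (out : List Int) : Decidable (Spec_sort_max_min arr out) := by unfold Spec_sort_max_min; infer_instance

-- ===== CLAIM (what is proved, stated in full; the proofs are below) =====
def Claim_equal_sort_max_min : Prop := ∀ (arr : List Int), Dom_sort_max_min arr → Spec_sort_max_min arr (sort_max_min arr)

-- ===== LEMMAS AND PROOFS =====

-- proof-side abstraction of the two-pointer interleave: weave of the remaining segment
def weave : List Int → List Int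
  | [] => []
  | [x] => [x]
  | x :: y :: rest =>
      (y :: rest).getLastD 0 :: x :: weave ((y :: rest).dropLast)
termination_by s => s.length
decreasing_by simp [List.length_dropLast]

-- invariant of max_element's fold: state holds a value of the list together with its
-- index, and dominates every element already scanned
lemma max_fold_inv (arr : List Int) (n : Nat) (hn : n ≤ arr.length) (st : Int × Nat)
    (h1 : st.2 < arr.length) (h2 : arr.getD st.2 0 = st.1) :
    let r := (List.range n).foldl
      (fun st i => if arr.getD i 0 > st.1 then (arr.getD i 0, i) else st) st
    r.2 < arr.length ∧ arr.getD r.2 0 = r.1 ∧ st.1 ≤ r.1 ∧ ∀ j < n, arr.getD j 0 ≤ r.1 := by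
  induction n with
  | zero => exact ⟨h1, h2, le_refl _, fun j hj => absurd hj (Nat.not_lt_zero j)⟩
  | succ m ih =>
    have hm : m ≤ arr.length := by omega
    obtain ⟨ih1, ih2, ih3, ih4⟩ := ih hm
    simp only [List.range_succ, List.foldl_append, List.foldl_cons, List.foldl_nil]
    set r := (List.range m).foldl
      (fun st i => if arr.getD i 0 > st.1 then (arr.getD i 0, i) else st) st with hr
    by_cases hc : arr.getD m 0 > r.1
    · simp only [if_pos hc]
      refine ⟨by omega, by trivial, by omega, ?_⟩
      intro j hj
      rcases Nat.lt_succ_iff_lt_or_eq.mp hj with h | h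
      · exact le_of_lt (lt_of_le_of_lt (ih4 j h) hc)
      · subst h; rfl
    · simp only [if_neg hc]
      refine ⟨ih1, ih2, ih3, ?_⟩
      intro j hj
      rcases Nat.lt_succ_iff_lt_or_eq.mp hj with h | h
      · exact ih4 j h
      · subst h; omega

lemma min_fold_inv (arr : List Int) (n : Nat) (hn : n ≤ arr.length) (st : Int × Nat)
    (h1 : st.2 < arr.length) (h2 : arr.getD st.2 0 = st.1) :
    let r := (List.range n).foldl
      (fun st i => if arr.getD i 0 < st.1 then (arr.getD i 0, i) else st) st
    r.2 < arr.length ∧ arr.getD r.2 0 = r.1 ∧ r.1 ≤ st.1 ∧ ∀ j < n, r.1 ≤ arr.getD j 0 := by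
  induction n with
  | zero => exact ⟨h1, h2, le_refl _, fun j hj => absurd hj (Nat.not_lt_zero j)⟩
  | succ m ih =>
    have hm : m ≤ arr.length := by omega
    obtain ⟨ih1, ih2, ih3, ih4⟩ := ih hm
    simp only [List.range_succ, List.foldl_append, List.foldl_cons, List.foldl_nil]
    set r := (List.range m).foldl
      (fun st i => if arr.getD i 0 < st.1 then (arr.getD i 0, i) else st) st with hr
    by_cases hc : arr.getD m 0 < r.1
    · simp only [if_pos hc]
      refine ⟨by omega, by trivial, by omega, ?_⟩
      intro j hj
      rcases Nat.lt_succ_iff_lt_or_eq.mp hj with h | h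
      · exact le_of_lt (lt_of_lt_of_le hc (ih4 j h))
      · subst h; rfl
    · simp only [if_neg hc]
      refine ⟨ih1, ih2, ih3, ?_⟩
      intro j hj
      rcases Nat.lt_succ_iff_lt_or_eq.mp hj with h | h
      · exact ih4 j h
      · subst h; omega

lemma max_element_spec (arr : List Int) (h : arr ≠ []) :
    (max_element arr).2 < arr.length ∧ arr.getD (max_element arr).2 0 = (max_element arr).1 ∧
    ∀ x ∈ arr, x ≤ (max_element arr).1 := by
  have hlen : 0 < arr.length := List.length_pos_iff.mpr h
  have hinit : arr.getD 0 0 = arr.headD 0 := by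
    cases arr with
    | nil => simp at hlen
    | cons a t => rfl
  obtain ⟨r1, r2, r3, r4⟩ := max_fold_inv arr arr.length le_rfl (arr.headD 0, 0) hlen hinit
  refine ⟨r1, r2, ?_⟩
  intro x hx
  obtain ⟨j, hj, hxe⟩ := List.mem_iff_getElem.mp hx
  have hg : arr.getD j 0 = x := by rw [List.getD_eq_getElem arr 0 hj, hxe]
  rw [← hg]; exact r4 j hj

lemma min_element_spec (arr : List Int) (h : arr ≠ []) :
    (min_element arr).2 < arr.length ∧ arr.getD (min_element arr).2 0 = (min_element arr).1 ∧
    ∀ x ∈ arr, (min_element arr).1 ≤ x := by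
  have hlen : 0 < arr.length := List.length_pos_iff.mpr h
  have hinit : arr.getD 0 0 = arr.headD 0 := by
    cases arr with
    | nil => simp at hlen
    | cons a t => rfl
  obtain ⟨r1, r2, r3, r4⟩ := min_fold_inv arr arr.length le_rfl (arr.headD 0, 0) hlen hinit
  refine ⟨r1, r2, ?_⟩
  intro x hx
  obtain ⟨j, hj, hxe⟩ := List.mem_iff_getElem.mp hx
  have hg : arr.getD j 0 = x := by rw [List.getD_eq_getElem arr 0 hj, hxe]
  rw [← hg]; exact r4 j hj

-- erasing at a valid index drops exactly that occurrence, up to permutation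
lemma perm_cons_eraseIdx' (arr : List Int) (idx : Nat) (h : idx < arr.length) :
    arr.Perm (arr.getD idx 0 :: arr.eraseIdx idx) := by
  rw [List.getD_eq_getElem arr 0 h]
  exact (List.getElem_cons_eraseIdx_perm h).symm

lemma sorted_getLast_eq_max (arr : List Int) (h : arr ≠ []) :
    (PySem.List.sorted arr (fun x => x) false).getLastD 0 = (max_element arr).1 := by
  obtain ⟨hidx, hval, hmax⟩ := max_element_spec arr h
  set s := PySem.List.sorted arr (fun x => x) false with hs
  have hsne : s ≠ [] := by
    intro hnil
    exact h ((PySem.List.sorted_eq_nil_iff arr _ _).mp hnil)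
  have hperm : s.Perm arr := PySem.List.sorted_perm arr _ _
  have hM : (max_element arr).1 ∈ arr := by
    rw [← hval]; rw [List.getD_eq_getElem arr 0 hidx]; exact List.getElem_mem hidx
  have hMs : (max_element arr).1 ∈ s := (PySem.List.mem_sorted arr _ _ _).mpr hM
  have hL : s.getLastD 0 = s.getLast hsne := by
    rw [List.getLastD_eq_getLast?, List.getLast?_eq_some_getLast hsne]; rfl
  have hLmem : s.getLast hsne ∈ arr := hperm.mem_iff.mp (List.getLast_mem hsne)
  have h1 : s.getLast hsne ≤ (max_element arr).1 := hmax _ hLmem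
  obtain ⟨p, hp, hpe⟩ := List.mem_iff_getElem.mp hMs
  have h2 : (max_element arr).1 ≤ s.getLast hsne := by
    rw [List.getLast_eq_getElem]
    rw [← hpe]
    exact PySem.List.sorted_id_getElem_mono arr (by omega) (by simp [hs]; omega)
  rw [hL]; omega

-- sorted(arr) with the (first) max removed is dropLast of sorted(arr)
lemma sorted_eraseIdx_max (arr : List Int) (h : arr ≠ []) :
    PySem.List.sorted (arr.eraseIdx (max_element arr).2) (fun x => x) false
      = (PySem.List.sorted arr (fun x => x) false).dropLast := by
  obtain ⟨hidx, hval, hmax⟩ := max_element_spec arr h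
  set s := PySem.List.sorted arr (fun x => x) false with hs
  have hsne : s ≠ [] := by
    intro hnil; exact h ((PySem.List.sorted_eq_nil_iff arr _ _).mp hnil)
  have hL : s.getLastD 0 = (max_element arr).1 := sorted_getLast_eq_max arr h
  have hLa : s.getLastD 0 = s.getLast hsne := by
    rw [List.getLastD_eq_getLast?, List.getLast?_eq_some_getLast hsne]; rfl
  have hsplit : s = s.dropLast ++ [(max_element arr).1] := by
    rw [← hL, hLa]; exact (List.dropLast_append_getLast hsne).symm
  have hperm1 : arr.Perm ((max_element arr).1 :: arr.eraseIdx (max_element arr).2) := by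
    have := perm_cons_eraseIdx' arr (max_element arr).2 hidx
    rwa [hval] at this
  have hperm2 : s.Perm ((max_element arr).1 :: s.dropLast) := by
    nth_rewrite 1 [hsplit]
    exact List.perm_append_singleton _ _
  have hperm3 : ((max_element arr).1 :: s.dropLast).Perm
      ((max_element arr).1 :: arr.eraseIdx (max_element arr).2) :=
    (hperm2.symm.trans (PySem.List.sorted_perm arr _ _)).trans hperm1
  have hperm4 : (s.dropLast).Perm (arr.eraseIdx (max_element arr).2) := hperm3.cons_inv
  have hpw : s.dropLast.Pairwise (· ≤ ·) := by
    have := PySem.List.sorted_pairwise (xs := arr) (key := fun x => x)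
    exact List.Pairwise.sublist (List.dropLast_sublist s) this
  exact PySem.List.sorted_id_eq_of_perm_of_pairwise _ _ hperm4 hpw

lemma sorted_head_eq_min (arr : List Int) (h : arr ≠ []) :
    (PySem.List.sorted arr (fun x => x) false).headD 0 = (min_element arr).1 := by
  obtain ⟨hidx, hval, hmin⟩ := min_element_spec arr h
  have hm : (min_element arr).1 ∈ arr := by
    rw [← hval, List.getD_eq_getElem arr 0 hidx]; exact List.getElem_mem hidx
  cases hsc : PySem.List.sorted arr (fun x => x) false with
  | nil => exact absurd ((PySem.List.sorted_eq_nil_iff arr _ _).mp hsc) h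
  | cons h0 t =>
    have h1 : h0 ≤ (min_element arr).1 :=
      PySem.List.key_head_sorted_le arr (fun x => x) hsc _ hm
    have h0mem : h0 ∈ arr := by
      have := (PySem.List.mem_sorted arr (fun x => x) false h0).mp
        (by rw [hsc]; exact List.mem_cons_self)
      exact this
    have h2 : (min_element arr).1 ≤ h0 := hmin _ h0mem
    simp; omega

-- sorted(arr) with the (first) min removed is tail of sorted(arr)
lemma sorted_eraseIdx_min (arr : List Int) (h : arr ≠ []) :
    PySem.List.sorted (arr.eraseIdx (min_element arr).2) (fun x => x) false
      = (PySem.List.sorted arr (fun x => x) false).tail := by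
  obtain ⟨hidx, hval, hmin⟩ := min_element_spec arr h
  have hhead : (PySem.List.sorted arr (fun x => x) false).headD 0 = (min_element arr).1 :=
    sorted_head_eq_min arr h
  cases hsc : PySem.List.sorted arr (fun x => x) false with
  | nil => exact absurd ((PySem.List.sorted_eq_nil_iff arr _ _).mp hsc) h
  | cons h0 t =>
    rw [hsc] at hhead
    simp at hhead
    have hperm1 : arr.Perm ((min_element arr).1 :: arr.eraseIdx (min_element arr).2) := by
      have := perm_cons_eraseIdx' arr (min_element arr).2 hidx
      rwa [hval] at this
    have hperm2 : ((min_element arr).1 :: t).Perm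
        ((min_element arr).1 :: arr.eraseIdx (min_element arr).2) := by
      have hsp : (h0 :: t).Perm arr := hsc ▸ PySem.List.sorted_perm arr _ _
      rw [hhead] at hsp
      exact hsp.trans hperm1
    have hperm3 : t.Perm (arr.eraseIdx (min_element arr).2) := hperm2.cons_inv
    have hpw : t.Pairwise (· ≤ ·) := by
      have := PySem.List.sorted_pairwise (xs := arr) (key := fun x => x)
      rw [hsc] at this
      exact (List.pairwise_cons.mp this).2
    simp only [List.tail_cons]
    exact PySem.List.sorted_id_eq_of_perm_of_pairwise _ _ hperm3 hpw

lemma getLastD_of_ne_nil (l : List Int) (d : Int) (h : l ≠ []) : l.getLastD d = l.getLastD 0 := by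
  rw [List.getLastD_eq_getLast?, List.getLastD_eq_getLast?, List.getLast?_eq_some_getLast h]
  rfl

-- main loop ↔ weave correspondence, by strong induction on temp.length
lemma sortLoopA_eq_weave (k : Nat) : ∀ (temp : List Int) (n i : Nat), temp.length = k →
    i ≤ n → temp.length = n - i →
    sortLoopA n i temp = weave (PySem.List.sorted temp (fun x => x) false) := by
  induction k using Nat.strong_induction_on with
  | _ k IH =>
  intro temp n i hk hle hlen
  by_cases hi : i < n
  · have hne : temp ≠ [] := by
      intro hnil; rw [hnil] at hlen; simp at hlen; omega
    have hglast := sorted_getLast_eq_max temp hne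
    have herase1 := sorted_eraseIdx_max temp hne
    obtain ⟨hidx, _, _⟩ := max_element_spec temp hne
    have hlen1 : (temp.eraseIdx (max_element temp).2).length = temp.length - 1 := by
      rw [List.length_eraseIdx]; rw [if_pos hidx]
    rw [sortLoopA]
    simp only [if_pos hi]
    by_cases hc : i + 1 < n
    · simp only [if_pos hc]
      set temp1 := temp.eraseIdx (max_element temp).2 with htemp1
      have hne1 : temp1 ≠ [] := by
        intro hnil; rw [hnil] at hlen1; simp at hlen1; omega
      have herase2 := sorted_eraseIdx_min temp1 hne1
      have hhead := sorted_head_eq_min temp1 hne1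
      obtain ⟨hidx1, _, _⟩ := min_element_spec temp1 hne1
      have hlen2 : ((temp1.eraseIdx (min_element temp1).2)).length = temp1.length - 1 := by
        rw [List.length_eraseIdx]; rw [if_pos hidx1]
      have hrec := IH ((temp1.eraseIdx (min_element temp1).2)).length
        (by omega) _ n (i + 2) rfl (by omega) (by omega)
      rw [hrec]
      have hslen : (PySem.List.sorted temp (fun x => x) false).length = temp.length :=
        PySem.List.length_sorted temp _ _
      cases hsc : PySem.List.sorted temp (fun x => x) false with
      | nil => rw [hsc] at hslen; simp at hslen; omega
      | cons x u =>
        cases u with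
        | nil => rw [hsc] at hslen; simp at hslen; omega
        | cons y rest =>
          rw [hsc] at hglast herase1
          rw [weave]
          have e1 : (max_element temp).1 = (y :: rest).getLastD 0 := by
            rw [← hglast, List.getLastD_cons, getLastD_of_ne_nil _ x (by simp)]
          have e2 : (min_element temp1).1 = x := by
            rw [← hhead, herase1, List.dropLast_cons₂, List.headD_cons]
          have e3 : PySem.List.sorted (temp1.eraseIdx (min_element temp1).2) (fun x => x) false
              = (y :: rest).dropLast := by
            rw [herase2, herase1, List.dropLast_cons₂, List.tail_cons]
          rw [e1, e2, e3]
    · simp only [if_neg hc]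
      have hn : n = i + 1 := by omega
      have hL1 : temp.length = 1 := by omega
      obtain ⟨a, ha⟩ : ∃ a, temp = [a] := by
        cases temp with
        | nil => simp at hL1
        | cons b t => cases t with
          | nil => exact ⟨b, rfl⟩
          | cons c t2 => simp at hL1
      rw [sortLoopA]
      simp only [if_neg (by omega : ¬ i + 1 < n)]
      subst ha
      have hsa : PySem.List.sorted [a] (fun x => x) false = [a] := rfl
      rw [hsa] at hglast ⊢
      rw [weave]
      simp at hglast
      rw [← hglast]
  · have : temp = [] := by
      apply List.length_eq_zero_iff.mp; omega
    subst this
    rw [sortLoopA]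
    simp only [if_neg hi]
    rw [show PySem.List.sorted ([] : List Int) (fun x => x) false = [] from rfl, weave]


-- getLastD of a nonempty list as its last element
lemma getLastD_eq_getElem' (l : List Int) (d : Int) (h : l ≠ []) :
    l.getLastD d = l[l.length - 1]'(by
      have := List.length_pos_iff.mpr h; omega) := by
  rw [List.getLastD_eq_getLast?, List.getLast?_eq_some_getLast h, Option.getD_some,
    List.getLast_eq_getElem]

-- the two-pointer loop computes weave of the segment s[lo..hi]
lemma weaveLoop_eq_weave (k : Nat) : ∀ (s : List Int) (lo hi : Int),
    0 ≤ lo → hi < (s.length : Int) → (hi + 1 - lo).toNat = k →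
    weaveLoop s lo hi = weave ((s.drop lo.toNat).take k) := by
  induction k using Nat.strong_induction_on with
  | _ k IH =>
  intro s lo hi hlo hhi hk
  by_cases hle : lo ≤ hi
  · have hk1 : 1 ≤ k := by omega
    have hsegk : ((s.drop lo.toNat).take k).length = k := by
      rw [List.length_take, List.length_drop]; omega
    have hgeti : ∀ (j : Nat) (hj : j < k),
        ((s.drop lo.toNat).take k)[j]'(by omega) = s[lo.toNat + j]'(by omega) := by
      intro j hj
      rw [List.getElem_take, List.getElem_drop]
    have hgethi : PySem.List.pyGetD s hi 0 = s[lo.toNat + (k - 1)]'(by omega) := by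
      rw [PySem.List.pyGetD_eq_getElem s 0 (by omega) (by omega)]
      congr 1; omega
    rw [weaveLoop]
    simp only [if_pos hle]
    by_cases hlt : lo < hi
    · have hk2 : 2 ≤ k := by omega
      have hgetlo : PySem.List.pyGetD s lo 0 = s[lo.toNat]'(by omega) := by
        rw [PySem.List.pyGetD_eq_getElem s 0 (by omega) (by omega)]
      obtain ⟨x, y, rest, hxy⟩ : ∃ x y rest, (s.drop lo.toNat).take k = x :: y :: rest := by
        cases hs0 : (s.drop lo.toNat).take k with
        | nil => rw [hs0] at hsegk; simp at hsegk; omega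
        | cons a t => cases ht : t with
          | nil => rw [hs0, ht] at hsegk; simp at hsegk; omega
          | cons b t2 => exact ⟨a, b, t2, by rw [← ht]⟩
      have htail : (y :: rest) = (s.drop (lo.toNat + 1)).take (k - 1) := by
        have h1 : ((s.drop lo.toNat).take k).drop 1 = y :: rest := by rw [hxy]; rfl
        rw [List.drop_take, List.drop_drop] at h1
        rw [← h1]
      have hmid : (s.drop ((lo + 1)).toNat).take (k - 2) = (y :: rest).dropLast := by
        rw [htail, List.dropLast_eq_take, List.take_take]
        have hlr : ((s.drop (lo.toNat + 1)).take (k - 1)).length = k - 1 := by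
          rw [List.length_take, List.length_drop]; omega
        rw [hlr]
        have : (lo + 1).toNat = lo.toNat + 1 := by omega
        rw [this]
        congr 1
        omega
      have hlast : (y :: rest).getLastD 0 = s[lo.toNat + (k - 1)]'(by omega) := by
        rw [htail]
        rw [getLastD_eq_getElem' _ _ (by rw [← htail]; simp)]
        rw [List.getElem_take, List.getElem_drop]
        congr 1
        rw [List.length_take, List.length_drop]
        omega
      have hx : x = s[lo.toNat + 0]'(by omega) := by
        have h1 : ((s.drop lo.toNat).take k)[0]'(by omega) = x := by
          rw [List.getElem_of_eq hxy]; rfl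
        rw [← h1]
        exact (hgeti 0 (by omega)).symm ▸ rfl
      have hrec := IH (k - 2) (by omega) s (lo + 1) (hi - 1) (by omega) (by omega) (by omega)
      rw [hrec, hmid]
      simp only [if_pos hlt]
      rw [hxy, weave]
      rw [hgethi, hgetlo, hlast, hx]
      rfl
    · -- lo = hi : single element
      have hk2 : k = 1 := by omega
      obtain ⟨z, hz⟩ : ∃ z, (s.drop lo.toNat).take k = [z] := by
        cases hs0 : (s.drop lo.toNat).take k with
        | nil => rw [hs0] at hsegk; simp at hsegk; omega
        | cons a t => cases ht : t with
          | nil => exact ⟨a, by rw [← ht]⟩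
          | cons b t2 => rw [hs0, ht] at hsegk; simp at hsegk; omega
      have hz0 : z = s[lo.toNat + 0]'(by omega) := by
        have h1 : ((s.drop lo.toNat).take k)[0]'(by omega) = z := by
          rw [List.getElem_of_eq hz]; rfl
        rw [← h1]
        exact (hgeti 0 (by omega)).symm ▸ rfl
      simp only [if_neg hlt]
      rw [weaveLoop]
      simp only [if_neg (by omega : ¬ lo + 1 ≤ hi - 1)]
      rw [hz, weave, hgethi, hz0]
      congr 2
      omega
  · have hk0 : k = 0 := by omega
    rw [weaveLoop]
    simp only [if_neg hle, hk0, List.take_zero]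
    rw [weave]

-- ===== VERDICT (by name: the statement is the Claim_ definition above) =====
theorem sort_max_min_spec : Claim_equal_sort_max_min := by
  intro arr _
  unfold Spec_sort_max_min sort_max_min sort_max_min_alt
  have h := weaveLoop_eq_weave (PySem.List.sorted arr (fun x => x) false).length
    (PySem.List.sorted arr (fun x => x) false) 0
    ((PySem.List.sorted arr (fun x => x) false).length - 1) (by omega) (by omega) (by omega)
  rw [h]
  simp only [Int.toNat_zero, List.drop_zero, List.take_length]
  exact sortLoopA_eq_weave arr.length arr arr.length 0 rfl (Nat.zero_le _) (by omega)
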